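-- pv_equiv track=rewrite | github.com/cary-rowen/brailleCellIgnorer | addon/globalPlugins/brailleCellIgnorer/cellMapping.py | _remapCellsToPhysical
-- ===== SOURCE A (Python) =====
-- def _remapCellsToPhysical(
--
-- 	logicalCells: list[int],
-- 	physicalCellCount: int,
-- 	ignoredCells: set[int],
-- ) -> list[int]:
-- 	"""Remap logical cells to physical display positions.
--
-- 	Inserts blank cells at ignored positions.
--
-- 	:param logicalCells: The logical cell values from the braille buffer.
-- 	:param physicalCellCount: The total number of physical cells on the display.
-- 	:param ignoredCells: 0-based indices of cells to ignore.
-- 	:return: Cell values for physical display.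
-- 	"""
-- 	physicalCells: list[int] = []
-- 	logicalIndex = 0
-- 	for physicalIndex in range(physicalCellCount):
-- 		if physicalIndex in ignoredCells:
-- 			physicalCells.append(0)
-- 		else:
-- 			if logicalIndex < len(logicalCells):
-- 				physicalCells.append(logicalCells[logicalIndex])
-- 			else:
-- 				physicalCells.append(0)
-- 			logicalIndex += 1
-- 	return physicalCells
-- ===== SOURCE B (Python) =====
-- def _remapCellsToPhysical(
-- 	logicalCells: list[int],
-- 	physicalCellCount: int,
-- 	ignoredCells: set[int],
-- ) -> list[int]:
-- 	slots = [i for i in range(physicalCellCount) if i not in ignoredCells]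
-- 	result = [0] * physicalCellCount
-- 	for slot, value in zip(slots, logicalCells):
-- 		result[slot] = value
-- 	return result
-- ===== Notes on version B (the rewrite author's own statement) =====
-- stated objective: simpler
-- what changed: Replaces A's single interleaved loop with a manual logicalIndex counter and conditional appends by two plain passes: build the list of non-ignored slot indices, preallocate [0]*physicalCellCount, and zip-scatter the logical values into those slots, letting zip truncate.
import Mathlib
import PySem

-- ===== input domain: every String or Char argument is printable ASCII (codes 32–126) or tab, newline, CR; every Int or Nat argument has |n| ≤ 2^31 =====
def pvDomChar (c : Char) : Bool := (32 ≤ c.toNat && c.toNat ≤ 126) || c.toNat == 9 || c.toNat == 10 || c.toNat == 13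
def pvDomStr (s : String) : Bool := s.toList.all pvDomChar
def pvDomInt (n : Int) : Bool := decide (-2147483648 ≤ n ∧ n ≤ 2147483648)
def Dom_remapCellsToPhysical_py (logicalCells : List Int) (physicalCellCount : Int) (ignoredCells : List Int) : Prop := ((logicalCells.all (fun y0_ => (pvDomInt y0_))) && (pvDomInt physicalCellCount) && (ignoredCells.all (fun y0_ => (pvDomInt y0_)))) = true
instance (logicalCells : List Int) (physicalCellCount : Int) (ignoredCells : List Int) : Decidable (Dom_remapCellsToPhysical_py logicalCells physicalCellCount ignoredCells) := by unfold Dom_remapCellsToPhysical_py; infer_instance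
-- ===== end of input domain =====

-- B replaces A's single interleaved loop (manual logicalIndex counter + append) by a slot-index
-- pass plus a zip-scatter into a preallocated zero list: a plainer decomposition, same cost.

-- ===== PORT A =====
-- literal port of A: one pass over range(physicalCellCount) with state (physicalCells, logicalIndex)
def remapCellsToPhysical_py (logicalCells : List Int) (physicalCellCount : Int) (ignoredCells : List Int) : List Int :=
  ((PySem.List.pyRange 0 physicalCellCount 1).foldl
    (fun (st : List Int × Int) physicalIndex =>
      if physicalIndex ∈ ignoredCells then (st.1 ++ [0], st.2)
      else if st.2 < (logicalCells.length : Int) then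
        -- logicalCells[logicalIndex]; the guard makes the index in range, so pyGetD is exact here
        (st.1 ++ [PySem.List.pyGetD logicalCells st.2 0], st.2 + 1)
      else (st.1 ++ [0], st.2 + 1))
    ([], 0)).1

-- ===== PORT B =====
-- literal port of Source B: slots = non-ignored physical indices; result = [0]*count; scatter zip(slots, logicalCells).
-- every slot comes from range(physicalCellCount), so it is ≥ 0 and .toNat is exact
def remapCellsToPhysical_py_alt (logicalCells : List Int) (physicalCellCount : Int) (ignoredCells : List Int) : List Int :=
  let slots := (PySem.List.pyRange 0 physicalCellCount 1).filter (fun i => decide (i ∉ ignoredCells))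
  let result := List.replicate physicalCellCount.toNat (0 : Int)
  (slots.zip logicalCells).foldl (fun res p => res.set p.1.toNat p.2) result

-- ===== PRECONDITION & SPEC =====
def Spec_remapCellsToPhysical_py (logicalCells : List Int) (physicalCellCount : Int) (ignoredCells : List Int) (out : List Int) : Prop := out = remapCellsToPhysical_py_alt logicalCells physicalCellCount ignoredCells
instance (logicalCells : List Int) (physicalCellCount : Int) (ignoredCells : List Int) (out : List Int) : Decidable (Spec_remapCellsToPhysical_py logicalCells physicalCellCount ignoredCells out) := by unfold Spec_remapCellsToPhysical_py; infer_instance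

-- ===== CLAIM (what is proved, stated in full; the proofs are below) =====
def Claim_equal_remapCellsToPhysical_py : Prop := ∀ (logicalCells : List Int) (physicalCellCount : Int) (ignoredCells : List Int), Dom_remapCellsToPhysical_py logicalCells physicalCellCount ignoredCells → Spec_remapCellsToPhysical_py logicalCells physicalCellCount ignoredCells (remapCellsToPhysical_py logicalCells physicalCellCount ignoredCells)

-- ===== LEMMAS AND PROOFS =====

-- zip distributes over an append on the left, dropping the consumed prefix on the right
theorem pvZip_append_right (l₁ l₂ r : List Int) :
    (l₁ ++ l₂).zip r = l₁.zip r ++ l₂.zip (r.drop l₁.length) := by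
  induction l₁ generalizing r with
  | nil => simp
  | cons a t ih =>
    cases r with
    | nil => simp
    | cons b r' => simp [ih]

-- scattering at indices inside X does not touch an appended tail Y
theorem pvScatter_append (pairs : List (Int × Int)) (X Y : List Int)
    (h : ∀ p ∈ pairs, p.1.toNat < X.length) :
    pairs.foldl (fun res p => res.set p.1.toNat p.2) (X ++ Y)
      = pairs.foldl (fun res p => res.set p.1.toNat p.2) X ++ Y := by
  induction pairs generalizing X with
  | nil => simp
  | cons p t ih =>
    have hp : p.1.toNat < X.length := h p (by simp)
    simp only [List.foldl_cons]
    rw [List.set_append_left _ _ hp, ih]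
    intro q hq
    simpa using h q (by simp [hq])

-- scattering preserves length
theorem pvScatter_length (pairs : List (Int × Int)) (X : List Int) :
    (pairs.foldl (fun res p => res.set p.1.toNat p.2) X).length = X.length := by
  induction pairs generalizing X with
  | nil => rfl
  | cons p t ih => simp [ih]

-- every first component of zip(slots, lc) is a non-ignored index in [0, m)
theorem pvZip_fst_lt (lc ig : List Int) (m : Nat)
    (p : Int × Int)
    (hp : p ∈ (((PySem.List.pyRange 0 m 1).filter (fun i => decide (i ∉ ig))).zip lc)) :
    p.1.toNat < m := by
  obtain ⟨h1, -⟩ := List.of_mem_zip (a := p.1) (b := p.2) (by simpa using hp)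
  have h2 := (List.mem_filter.mp h1).1
  have h3 := PySem.List.mem_pyRange_one.mp h2
  omega

-- the core invariant: A's fold over range(0,m) returns B's scatter result paired with the slot count
theorem pvMain (lc ig : List Int) (m : Nat) :
    ((PySem.List.pyRange 0 m 1).foldl
      (fun (st : List Int × Int) physicalIndex =>
        if physicalIndex ∈ ig then (st.1 ++ [0], st.2)
        else if st.2 < (lc.length : Int) then
          (st.1 ++ [PySem.List.pyGetD lc st.2 0], st.2 + 1)
        else (st.1 ++ [0], st.2 + 1))
      ([], 0))
    = ((((PySem.List.pyRange 0 m 1).filter (fun i => decide (i ∉ ig))).zip lc).foldl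
         (fun res p => res.set p.1.toNat p.2) (List.replicate m (0 : Int)),
       ((((PySem.List.pyRange 0 m 1).filter (fun i => decide (i ∉ ig))).length : Int))) := by
  induction m with
  | zero => simp [PySem.List.pyRange_one_eq_nil]
  | succ m ih =>
    have hcast : ((m + 1 : Nat) : Int) = (m : Int) + 1 := by push_cast; ring
    rw [hcast, PySem.List.pyRange_one_succ_right (by positivity), List.foldl_append, ih,
        List.filter_append, List.replicate_succ']
    simp only [List.foldl_cons, List.foldl_nil, List.filter_cons, List.filter_nil]
    have hbound : ∀ p ∈ (((PySem.List.pyRange 0 m 1).filter (fun i => decide (i ∉ ig))).zip lc),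
        p.1.toNat < (List.replicate m (0 : Int)).length := by
      intro p hp
      simpa using pvZip_fst_lt lc ig m p hp
    by_cases hm : ((m : Int)) ∈ ig
    · have hpm : decide ((m : Int) ∉ ig) = false := by simp [hm]
      rw [if_pos hm]
      simp only [hpm, Bool.false_eq_true, if_false, List.append_nil]
      rw [pvScatter_append _ _ _ hbound]
    · have hpm : decide ((m : Int) ∉ ig) = true := by simp [hm]
      rw [if_neg hm]
      simp only [hpm, if_true]
      rw [pvZip_append_right, List.foldl_append, pvScatter_append _ _ _ hbound]
      set slots := (PySem.List.pyRange 0 m 1).filter (fun i => decide (i ∉ ig)) with hslots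
      set B := (slots.zip lc).foldl (fun res p => res.set p.1.toNat p.2)
        (List.replicate m (0 : Int)) with hB
      have hBlen : B.length = m := by
        rw [hB, pvScatter_length]; simp
      by_cases hk : (slots.length : Int) < (lc.length : Int)
      · have hklt : slots.length < lc.length := by exact_mod_cast hk
        rw [if_pos hk, List.drop_eq_getElem_cons hklt]
        simp only [List.zip_cons_cons, List.zip_nil_left, List.foldl_cons, List.foldl_nil,
          Prod.mk.injEq]
        refine ⟨?_, by simp [add_comm]⟩
        rw [Int.toNat_natCast, List.set_append, if_neg (by omega)]
        simp [hBlen, PySem.List.pyGetD_natCast, List.getD_eq_getElem?_getD,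
          List.getElem?_eq_getElem hklt]
      · rw [if_neg hk, List.drop_eq_nil_of_le (by omega)]
        simp only [List.zip_nil_right, List.foldl_nil, Prod.mk.injEq]
        exact ⟨trivial, by simp [add_comm]⟩

theorem pvRange_toNat (n : Int) :
    PySem.List.pyRange 0 n 1 = PySem.List.pyRange 0 (n.toNat : Int) 1 := by
  rcases (by omega : n ≤ 0 ∨ 0 < n) with h | h
  · rw [PySem.List.pyRange_one_eq_nil h, PySem.List.pyRange_one_eq_nil (by simp [Int.toNat_of_nonpos h])]
  · rw [Int.toNat_of_nonneg h.le]

-- ===== VERDICT (by name: the statement is the Claim_ definition above) =====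
theorem remapCellsToPhysical_py_spec : Claim_equal_remapCellsToPhysical_py := by
  intro lc n ig _
  show _ = _
  unfold remapCellsToPhysical_py remapCellsToPhysical_py_alt
  rw [pvRange_toNat n, pvMain lc ig n.toNat]
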